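-- pv_equiv track=rewrite | github.com/Giovannibriglia/VectorizedBayesianNetwork | benchmarking/generate_bnlearn.py | _parents_by_node
-- ===== SOURCE A (Python) =====
-- from typing import Any, Callable, Dict, List, Tuple
--
-- def _parents_by_node(
--     nodes: List[str], edges: List[Tuple[str, str]]
-- ) -> Dict[str, List[str]]:
--     parents = {n: [] for n in nodes}
--     for p, c in edges:
--         parents[c].append(p)
--     idx = {n: i for i, n in enumerate(nodes)}
--     for n in nodes:
--         parents[n] = sorted(parents[n], key=lambda x: idx[x])
--     return parents
-- ===== SOURCE B (Python) =====
-- def _parents_by_node(nodes, edges):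
--     idx = {n: i for i, n in enumerate(nodes)}
--     parents = {n: [] for n in nodes}
--     for p, c in sorted(edges, key=lambda e: idx[e[0]]):
--         parents[c].append(p)
--     return parents
-- ===== Notes on version B (the rewrite author's own statement) =====
-- stated objective: alternative
-- what changed: B replaces A's two-phase append-then-sort-each-node's-list with one global stable sort of the edge list by parent index followed by a single append pass, exploiting stability so every per-node list comes out already index-ordered.
import Mathlib
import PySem

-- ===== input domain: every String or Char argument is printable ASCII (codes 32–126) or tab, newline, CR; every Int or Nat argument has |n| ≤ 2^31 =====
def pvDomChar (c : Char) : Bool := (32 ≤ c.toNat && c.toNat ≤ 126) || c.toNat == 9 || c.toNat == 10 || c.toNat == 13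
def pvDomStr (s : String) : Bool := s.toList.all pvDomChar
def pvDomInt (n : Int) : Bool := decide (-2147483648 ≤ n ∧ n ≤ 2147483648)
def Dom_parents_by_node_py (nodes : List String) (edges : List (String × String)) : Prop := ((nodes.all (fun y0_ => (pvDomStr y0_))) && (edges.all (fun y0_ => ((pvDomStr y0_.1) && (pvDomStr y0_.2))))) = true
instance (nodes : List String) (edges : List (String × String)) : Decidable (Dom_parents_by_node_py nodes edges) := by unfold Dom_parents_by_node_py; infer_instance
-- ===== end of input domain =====

-- B sorts the edge list once globally by parent index and fills the parent lists in
-- one append pass, instead of A's append-everything-then-sort-each-node's-list; objective: alternative decomposition.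

-- ===== PORT A =====
-- `parents[c].append(p)` is ported with Dict.modify; Python raises KeyError when c is
-- missing (Pre_ excludes exactly those inputs), and `idx[x]` inside the sort key is
-- ported with getD (Pre_ also excludes parents outside nodes, on which Python raises).
def parents_by_node_py (nodes : List String) (edges : List (String × String)) : List (String × List String) :=
  let parents0 : PySem.Dict String (List String) :=
    nodes.foldl (fun d n => d.insert n []) PySem.Dict.empty
  let parents1 :=
    edges.foldl (fun d e => d.modify e.2 [] (fun l => l ++ [e.1])) parents0
  let idx : PySem.Dict String Int :=
    (PySem.List.enumerate nodes).foldl (fun d p => d.insert p.2 p.1) PySem.Dict.empty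
  let parents2 :=
    nodes.foldl (fun d n => d.insert n (PySem.List.sorted (d.getD n []) (fun x => idx.getD x 0))) parents1
  parents2.items

-- ===== PORT B =====
def parents_by_node_py_alt (nodes : List String) (edges : List (String × String)) : List (String × List String) :=
  let idx : PySem.Dict String Int :=
    (PySem.List.enumerate nodes).foldl (fun d p => d.insert p.2 p.1) PySem.Dict.empty
  let parents0 : PySem.Dict String (List String) :=
    nodes.foldl (fun d n => d.insert n []) PySem.Dict.empty
  let es := PySem.List.sorted edges (fun e => idx.getD e.1 0)
  let parents :=
    es.foldl (fun d e => d.modify e.2 [] (fun l => l ++ [e.1])) parents0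
  parents.items

-- ===== PRECONDITION & SPEC =====
-- Pre_ is exactly where the Python A returns: with an edge endpoint outside nodes,
-- A raises KeyError (at the append for an unknown child, in the sort key for an unknown parent).
def Pre_parents_by_node_py (nodes : List String) (edges : List (String × String)) : Prop :=
  ∀ e ∈ edges, e.1 ∈ nodes ∧ e.2 ∈ nodes
instance (nodes : List String) (edges : List (String × String)) : Decidable (Pre_parents_by_node_py nodes edges) := by unfold Pre_parents_by_node_py; infer_instance

def pvWitness_parents_by_node_py : List String × (List (String × String)) :=
  (["a", "b", "c"], [("b", "c"), ("a", "c"), ("c", "a")])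

def Spec_parents_by_node_py (nodes : List String) (edges : List (String × String)) (out : List (String × List String)) : Prop := out = parents_by_node_py_alt nodes edges
instance (nodes : List String) (edges : List (String × String)) (out : List (String × List String)) : Decidable (Spec_parents_by_node_py nodes edges out) := by unfold Spec_parents_by_node_py; infer_instance

-- ===== CLAIM (what is proved, stated in full; the proofs are below) =====
def Claim_equal_parents_by_node_py : Prop := ∀ (nodes : List String) (edges : List (String × String)), Dom_parents_by_node_py nodes edges → Pre_parents_by_node_py nodes edges → Spec_parents_by_node_py nodes edges (parents_by_node_py nodes edges)

-- ===== LEMMAS AND PROOFS =====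

-- insertBy with a strict key comparison preserves key-sortedness of the accumulator
theorem pv_insertBy_pairwise {α : Type} (key : α → Int) (x : α) (acc : List α)
    (h : acc.Pairwise (fun a b => key a ≤ key b)) :
    (PySem.List.insertBy (fun a b => decide (key a < key b)) x acc).Pairwise
      (fun a b => key a ≤ key b) := by
  induction acc with
  | nil => simp [PySem.List.insertBy]
  | cons y ys ih =>
    rcases List.pairwise_cons.mp h with ⟨hy, hys⟩
    by_cases hxy : key x < key y
    · simp only [PySem.List.insertBy, hxy, decide_true, if_true]
      refine List.pairwise_cons.mpr ⟨?_, h⟩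
      intro z hz
      rcases List.mem_cons.mp hz with rfl | hz
      · omega
      · have := hy z hz; omega
    · simp only [PySem.List.insertBy, hxy, decide_false, Bool.false_eq_true, if_false]
      refine List.pairwise_cons.mpr ⟨?_, ih hys⟩
      intro z hz
      rcases (PySem.List.mem_insertBy _ _ _ _).mp hz with hz | hz
      · subst hz; omega
      · exact hy z hz

-- inserting in front of a list whose elements all have strictly larger key
theorem pv_insertBy_eq_cons {α : Type} (key : α → Int) (x : α) (l : List α)
    (h : ∀ z ∈ l, key x < key z) :
    PySem.List.insertBy (fun a b => decide (key a < key b)) x l = x :: l := by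
  cases l with
  | nil => rfl
  | cons z zs =>
    have : key x < key z := h z (List.mem_cons_self)
    simp [PySem.List.insertBy, this]

-- filtering commutes with a single stable insertion into a key-sorted accumulator
theorem pv_filter_insertBy {α : Type} (key : α → Int) (p : α → Bool) (x : α) :
    ∀ (acc : List α), acc.Pairwise (fun a b => key a ≤ key b) →
    (PySem.List.insertBy (fun a b => decide (key a < key b)) x acc).filter p
      = if p x then PySem.List.insertBy (fun a b => decide (key a < key b)) x (acc.filter p)
        else acc.filter p := by
  intro acc
  induction acc with
  | nil =>
    intro _
    by_cases hp : p x <;> simp [PySem.List.insertBy, List.filter, hp]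
  | cons y ys ih =>
    intro h
    rcases List.pairwise_cons.mp h with ⟨hy, hys⟩
    by_cases hxy : key x < key y
    · simp only [PySem.List.insertBy, hxy, decide_true, if_true]
      by_cases hp : p x
      · have hfront : ∀ z ∈ (y :: ys).filter p, key x < key z := by
          intro z hz
          have hz' := List.mem_of_mem_filter hz
          rcases List.mem_cons.mp hz' with rfl | hz'
          · exact hxy
          · have := hy z hz'; omega
        rw [pv_insertBy_eq_cons key x _ hfront]
        simp [List.filter, hp]
      · simp [List.filter, hp]
    · simp only [PySem.List.insertBy, hxy, decide_false, Bool.false_eq_true, if_false]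
      by_cases hpy : p y
      · simp only [List.filter, hpy, ih hys]
        by_cases hp : p x
        · simp only [hp, if_true]
          have : ¬ (key x < key y) := hxy
          simp [PySem.List.insertBy, this]
        · simp [hp]
      · simp only [List.filter, hpy, ih hys]

-- filtering commutes with the whole insertion-sort fold
theorem pv_filter_foldl_insertBy {α : Type} (key : α → Int) (p : α → Bool) :
    ∀ (l acc : List α), acc.Pairwise (fun a b => key a ≤ key b) →
    (l.foldl (fun acc x => PySem.List.insertBy (fun a b => decide (key a < key b)) x acc) acc).filter p
      = (l.filter p).foldl (fun acc x => PySem.List.insertBy (fun a b => decide (key a < key b)) x acc)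
          (acc.filter p) := by
  intro l
  induction l with
  | nil => intro acc _; rfl
  | cons x l ih =>
    intro acc h
    have hacc' := pv_insertBy_pairwise key x acc h
    simp only [List.foldl_cons]
    rw [ih _ hacc', pv_filter_insertBy key p x acc h]
    by_cases hp : p x
    · simp [hp]
    · simp [hp]

-- filter of a stable sort = stable sort of the filter (same key)
theorem pv_filter_sorted {α : Type} (key : α → Int) (p : α → Bool) (l : List α) :
    (PySem.List.sorted l key).filter p = PySem.List.sorted (l.filter p) key := by
  rw [PySem.List.sorted_eq_foldl_insertBy, PySem.List.sorted_eq_foldl_insertBy]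
  exact pv_filter_foldl_insertBy key p l [] (by simp)

-- projecting the first component commutes with a single insertion keyed on it
theorem pv_map_insertBy (key : String → Int) (x : String × String) :
    ∀ (acc : List (String × String)),
    (PySem.List.insertBy (fun a b => decide (key a.1 < key b.1)) x acc).map Prod.fst
      = PySem.List.insertBy (fun a b => decide (key a < key b)) x.1 (acc.map Prod.fst) := by
  intro acc
  induction acc with
  | nil => rfl
  | cons y ys ih =>
    by_cases hxy : key x.1 < key y.1
    · simp [PySem.List.insertBy, hxy]
    · simp [PySem.List.insertBy, hxy, ih]

-- projecting the first component commutes with the whole insertion-sort fold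
theorem pv_map_foldl_insertBy (key : String → Int) :
    ∀ (l acc : List (String × String)),
    (l.foldl (fun acc x => PySem.List.insertBy (fun a b => decide (key a.1 < key b.1)) x acc) acc).map Prod.fst
      = (l.map Prod.fst).foldl
          (fun acc x => PySem.List.insertBy (fun a b => decide (key a < key b)) x acc)
          (acc.map Prod.fst) := by
  intro l
  induction l with
  | nil => intro acc; rfl
  | cons x l ih =>
    intro acc
    simp only [List.foldl_cons, List.map_cons, ih, pv_map_insertBy key x acc]

-- sorting edges by the parent's key and projecting parents = sorting the parents
theorem pv_map_fst_sorted (key : String → Int) (l : List (String × String)) :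
    (PySem.List.sorted l (fun e => key e.1)).map Prod.fst
      = PySem.List.sorted (l.map Prod.fst) key := by
  rw [PySem.List.sorted_eq_foldl_insertBy, PySem.List.sorted_eq_foldl_insertBy]
  exact pv_map_foldl_insertBy key l []

-- the {n: [] for n in nodes} dict looks up to [] everywhere
theorem pv_getD_insert_nil_fold :
    ∀ (ns : List String) (d : PySem.Dict String (List String)),
    (∀ k, d.getD k [] = []) → ∀ k,
    (ns.foldl (fun d n => d.insert n []) d).getD k [] = [] := by
  intro ns
  induction ns with
  | nil => intro d h k; exact h k
  | cons n ns ih =>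
    intro d h k
    refine ih _ (fun k' => ?_) k
    rw [PySem.Dict.getD_insert]
    split <;> simp [h]

-- the appending loop: each child's list gains the parents of its edges in order
theorem pv_getD_modify_fold :
    ∀ (es : List (String × String)) (d : PySem.Dict String (List String)) (c : String),
    (es.foldl (fun d e => d.modify e.2 [] (fun l => l ++ [e.1])) d).getD c []
      = d.getD c [] ++ (es.filter (fun e => e.2 == c)).map Prod.fst := by
  intro es
  induction es with
  | nil => intro d c; simp
  | cons e es ih =>
    intro d c
    simp only [List.foldl_cons, ih, List.filter]
    by_cases hc : e.2 = c
    · subst hc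
      rw [PySem.Dict.getD_modify]
      simp
    · have hbe : (e.2 == c) = false := by simpa using hc
      have hc' : ¬ c = e.2 := fun h => hc h.symm
      rw [PySem.Dict.getD_modify]
      simp [hc', hbe]

-- A's per-node re-sorting loop, with sorted_sorted absorbing duplicate visits
theorem pv_getD_sortloop (key : String → Int) :
    ∀ (ns : List String) (d : PySem.Dict String (List String)) (k : String),
    (ns.foldl (fun d n => d.insert n (PySem.List.sorted (d.getD n []) key)) d).getD k []
      = if k ∈ ns then PySem.List.sorted (d.getD k []) key else d.getD k [] := by
  intro ns
  induction ns with
  | nil => intro d k; simp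
  | cons n ns ih =>
    intro d k
    simp only [List.foldl_cons, ih, PySem.Dict.getD_insert, List.mem_cons]
    by_cases hk : k = n
    · subst hk
      by_cases hmem : k ∈ ns <;> simp [hmem, PySem.List.sorted_sorted]
    · by_cases hmem : k ∈ ns <;> simp [hk, hmem]

-- adding already-present elements to a Set is a no-op
theorem pv_set_update_of_subset :
    ∀ (l : List String) (s : PySem.Set String), (∀ x ∈ l, x ∈ s) → PySem.Set.update s l = s := by
  intro l
  induction l with
  | nil => intro s _; rfl
  | cons x l ih =>
    intro s h
    have hmem : x ∈ s := h x List.mem_cons_self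
    show List.foldl PySem.Set.add (s.add x) l = s
    rw [show s.add x = s by simp [PySem.Set.add, PySem.Set.contains, hmem]]
    exact ih s (fun y hy => h y (List.mem_cons_of_mem x hy))

-- ===== VERDICT (by name: the statement is the Claim_ definition above) =====
theorem parents_by_node_py_spec : Claim_equal_parents_by_node_py := by
  intro nodes edges _ hpre
  unfold Spec_parents_by_node_py parents_by_node_py parents_by_node_py_alt
  simp only []
  set idx : PySem.Dict String Int :=
    (PySem.List.enumerate nodes).foldl (fun d p => d.insert p.2 p.1) PySem.Dict.empty with hidx
  set key : String → Int := fun x => idx.getD x 0 with hkey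
  set parents0 : PySem.Dict String (List String) :=
    nodes.foldl (fun d n => d.insert n []) PySem.Dict.empty with hp0
  set parents1 := edges.foldl (fun d e => d.modify e.2 [] (fun l => l ++ [e.1])) parents0 with hp1
  set parents2 :=
    nodes.foldl (fun d n => d.insert n (PySem.List.sorted (d.getD n []) key)) parents1 with hp2
  set es := PySem.List.sorted edges (fun e => key e.1) with hes
  set parentsB := es.foldl (fun d e => d.modify e.2 [] (fun l => l ++ [e.1])) parents0 with hpB
  -- keys
  have hkeys0 : parents0.keys = PySem.Set.ofList nodes := by
    rw [hp0, PySem.Dict.keys_foldl_insert, PySem.Dict.keys_empty, PySem.Set.ofList_eq_foldl]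
    rfl
  have hnodup0 : parents0.keys.Nodup :=
    PySem.Dict.nodup_keys_foldl_insert _ _ _ PySem.Dict.nodup_keys_empty
  have hsub : ∀ (l : List (String × String)), (∀ e ∈ l, e.2 ∈ nodes) →
      PySem.Set.update parents0.keys (l.map Prod.snd) = parents0.keys := by
    intro l hl
    refine pv_set_update_of_subset _ _ ?_
    intro x hx
    rcases List.mem_map.mp hx with ⟨e, he, rfl⟩
    rw [hkeys0]
    exact (PySem.Set.mem_ofList _ _).mpr (hl e he)
  have hkeys1 : parents1.keys = parents0.keys := by
    rw [hp1, PySem.Dict.keys_foldl_modify_key (key := Prod.snd)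
      (f := fun d e => fun l => l ++ [e.1])]
    exact hsub edges (fun e he => (hpre e he).2)
  have hnodup1 : parents1.keys.Nodup := by rw [hkeys1]; exact hnodup0
  have hkeys2 : parents2.keys = parents0.keys := by
    rw [hp2, PySem.Dict.keys_foldl_insert, hkeys1, hkeys0]
    refine pv_set_update_of_subset _ _ ?_
    intro x hx
    exact (PySem.Set.mem_ofList _ _).mpr hx
  have hnodup2 : parents2.keys.Nodup := by rw [hkeys2]; exact hnodup0
  have hkeysB : parentsB.keys = parents0.keys := by
    rw [hpB, PySem.Dict.keys_foldl_modify_key (key := Prod.snd)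
      (f := fun d e => fun l => l ++ [e.1])]
    refine hsub es ?_
    intro e he
    exact (hpre e ((PySem.List.mem_sorted _ _ _ _).mp he)).2
  have hnodupB : parentsB.keys.Nodup := by rw [hkeysB]; exact hnodup0
  -- values at every key of nodes
  have hval : ∀ k ∈ nodes, parents2.getD k [] = parentsB.getD k [] := by
    intro k hk
    have h0 : ∀ k', parents0.getD k' [] = [] := by
      intro k'
      rw [hp0]
      exact pv_getD_insert_nil_fold nodes _ (fun _ => PySem.Dict.getD_empty _ _) k'
    have hA : parents2.getD k [] =
        PySem.List.sorted ((edges.filter (fun e => e.2 == k)).map Prod.fst) key := by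
      rw [hp2, pv_getD_sortloop key nodes parents1 k, if_pos hk, hp1,
        pv_getD_modify_fold, h0, List.nil_append]
    have hB : parentsB.getD k [] = (es.filter (fun e => e.2 == k)).map Prod.fst := by
      rw [hpB, pv_getD_modify_fold, h0, List.nil_append]
    rw [hA, hB, hes, pv_filter_sorted (fun e => key e.1) (fun e => e.2 == k) edges,
      pv_map_fst_sorted key]
  -- assemble items
  rw [PySem.Dict.items_eq_map_keys parents2 hnodup2 [],
    PySem.Dict.items_eq_map_keys parentsB hnodupB [], hkeys2, hkeysB]
  refine List.map_congr_left ?_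
  intro k hk
  have hkn : k ∈ nodes := by
    rw [hkeys0] at hk
    exact (PySem.Set.mem_ofList _ _).mp hk
  simp [hval k hkn]
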